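-- pv_equiv track=rewrite | github.com/Zselter07/AmazonScraper | create_branch.py | project_name_to_id
-- ===== SOURCE A (Python) =====
-- def project_name_to_id(name):
--     project_id = ''
--     should_add = True
--     separators = [
--         '-', ' ', '_'
--     ]
--
--     for c in name:
--         s = str(c)
--
--         if (should_add or s == s.upper()) and s not in separators:
--             project_id += s
--
--         if s in separators:
--             should_add = True
--         else:
--             should_add = False
--
--     if len(project_id) == 0:
--         project_id = name
--
--     return project_id
-- ===== SOURCE B (Python) =====
-- def project_name_to_id(name):
--     separators = ['-', ' ', '_']
--     tokens = [str(c) for c in name]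
--     # phase 1: split the token list at separators, preserving empty groups
--     groups = [[]]
--     for t in tokens:
--         if t in separators:
--             groups.append([])
--         else:
--             groups[-1].append(t)
--     # phase 2: collect each group's first token plus later tokens equal to their uppercase
--     parts = []
--     for g in groups:
--         for i, t in enumerate(g):
--             if i == 0 or t == t.upper():
--                 parts.append(t)
--     project_id = ''.join(parts)
--     return project_id if project_id else name
-- ===== Notes on version B (the rewrite author's own statement) =====
-- stated objective: alternative
-- what changed: Replaces A's single pass with a carried should_add flag by a two-phase decomposition: split the character list into separator-delimited groups (preserving empty groups), then collect each group's first character plus later characters equal to their uppercase, with the same empty-result fallback.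
import Mathlib
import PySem

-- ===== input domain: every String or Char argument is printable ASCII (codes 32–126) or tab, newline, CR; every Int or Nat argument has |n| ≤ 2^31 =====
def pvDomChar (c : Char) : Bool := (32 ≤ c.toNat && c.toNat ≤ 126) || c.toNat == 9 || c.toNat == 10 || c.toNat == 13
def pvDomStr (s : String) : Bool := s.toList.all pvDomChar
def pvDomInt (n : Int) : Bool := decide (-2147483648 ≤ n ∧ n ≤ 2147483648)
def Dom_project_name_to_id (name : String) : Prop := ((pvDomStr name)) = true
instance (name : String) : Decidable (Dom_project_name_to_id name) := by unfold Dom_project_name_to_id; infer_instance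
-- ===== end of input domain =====

-- B re-implements A by a different decomposition: split the char list into separator-delimited
-- groups (preserving empty groups), then collect each group's first char plus later chars equal
-- to their uppercase (objective: alternative structure, same cost).

-- ===== PORT A =====
-- literal transliteration of A's single accumulator loop (str(c) on a char of a string is the char itself)
def project_name_to_id (name : String) : String :=
  let r := name.toList.foldl
    (fun (st : List Char × Bool) c =>
      let s := c
      let inSep := s == '-' || s == ' ' || s == '_'
      ((if (st.2 || s == PySem.Chars.upperChar s) && !inSep then st.1 ++ [s] else st.1), inSep))
    ([], true)
  if r.1.length == 0 then name else String.ofList r.1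

-- ===== PORT B =====
-- B's inner loop over one group: keep index 0 and any t with t == t.upper()
def pvPick (g : List Char) : List Char :=
  match g with
  | [] => []
  | t0 :: ts => t0 :: ts.filter (fun t => t == PySem.Chars.upperChar t)

def project_name_to_id_alt (name : String) : String :=
  let tokens := name.toList
  -- phase 1: groups[-1].append(t) / groups.append([]) loop
  let groups := tokens.foldl
    (fun (groups : List (List Char)) t =>
      if t == '-' || t == ' ' || t == '_' then groups ++ [[]]
      else groups.dropLast ++ [groups.getLastD [] ++ [t]])
    [[]]
  -- phase 2
  let parts := groups.flatMap pvPick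
  let project_id := String.ofList parts
  if project_id == "" then name else project_id

-- ===== PRECONDITION & SPEC =====
def Spec_project_name_to_id (name : String) (out : String) : Prop := out = project_name_to_id_alt name
instance (name : String) (out : String) : Decidable (Spec_project_name_to_id name out) := by unfold Spec_project_name_to_id; infer_instance

-- ===== CLAIM (what is proved, stated in full; the proofs are below) =====
def Claim_equal_project_name_to_id : Prop := ∀ (name : String), Dom_project_name_to_id name → Spec_project_name_to_id name (project_name_to_id name)

-- ===== LEMMAS AND PROOFS =====

-- tail of A's loop as a structural recursion on the remaining chars
def pvAOut (sa : Bool) : List Char → List Char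
  | [] => []
  | c :: cs =>
      (if (sa || c == PySem.Chars.upperChar c) && !(c == '-' || c == ' ' || c == '_')
        then [c] else []) ++ pvAOut (c == '-' || c == ' ' || c == '_') cs

-- recursive (front-first) form of B's split loop
def pvSplit (tokens : List Char) : List (List Char) :=
  match tokens with
  | [] => [[]]
  | head :: rest =>
    let groups := pvSplit rest
    if head == '-' || head == ' ' || head == '_' then [] :: groups
    else (head :: groups.headD []) :: groups.tail

def pvMapHead (g : List Char) : List (List Char) → List (List Char)
  | [] => []
  | h :: r => (g ++ h) :: r

theorem pvSplit_ne_nil (cs : List Char) : pvSplit cs ≠ [] := by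
  cases cs with
  | nil => simp [pvSplit]
  | cons c cs => simp only [pvSplit]; split <;> simp

theorem pvFoldA (cs : List Char) : ∀ (pid : List Char) (sa : Bool),
    (cs.foldl
      (fun (st : List Char × Bool) c =>
        let s := c
        let inSep := s == '-' || s == ' ' || s == '_'
        ((if (st.2 || s == PySem.Chars.upperChar s) && !inSep then st.1 ++ [s] else st.1), inSep))
      (pid, sa)).1 = pid ++ pvAOut sa cs := by
  induction cs with
  | nil => intro pid sa; simp [pvAOut]
  | cons c cs ih =>
    intro pid sa
    simp only [List.foldl_cons, pvAOut]
    split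
    · rw [ih]; simp
    · rw [ih]; simp

-- B's forward group-building loop computes pvSplit
theorem pvFoldB (ts : List Char) : ∀ (gs : List (List Char)) (g : List Char),
    ts.foldl
      (fun (groups : List (List Char)) t =>
        if t == '-' || t == ' ' || t == '_' then groups ++ [[]]
        else groups.dropLast ++ [groups.getLastD [] ++ [t]])
      (gs ++ [g]) = gs ++ pvMapHead g (pvSplit ts) := by
  induction ts with
  | nil => intro gs g; simp [pvSplit, pvMapHead]
  | cons t ts ih =>
    intro gs g
    simp only [List.foldl_cons]
    by_cases hs : (t == '-' || t == ' ' || t == '_') = true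
    · rw [if_pos hs]
      have : gs ++ [g] ++ [[]] = (gs ++ [g]) ++ [([] : List Char)] := by simp
      rw [this, ih]
      obtain ⟨h, r, hr⟩ : ∃ h r, pvSplit ts = h :: r := by
        cases hsp : pvSplit ts with
        | nil => exact absurd hsp (pvSplit_ne_nil ts)
        | cons h r => exact ⟨h, r, rfl⟩
      simp [pvSplit, hs, hr, pvMapHead]
    · rw [if_neg hs]
      have hdl : (gs ++ [g]).dropLast = gs := by simp
      have hgl : (gs ++ [g]).getLastD [] = g := by simp
      rw [hdl, hgl, ih]
      obtain ⟨h, r, hr⟩ : ∃ h r, pvSplit ts = h :: r := by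
        cases hsp : pvSplit ts with
        | nil => exact absurd hsp (pvSplit_ne_nil ts)
        | cons h r => exact ⟨h, r, rfl⟩
      simp [pvSplit, hs, hr, pvMapHead]

theorem pvMain (cs : List Char) :
    pvAOut true cs = (pvSplit cs).flatMap pvPick ∧
    pvAOut false cs =
      ((pvSplit cs).headD []).filter (fun t => t == PySem.Chars.upperChar t)
        ++ ((pvSplit cs).tail).flatMap pvPick := by
  induction cs with
  | nil => simp [pvAOut, pvSplit, pvPick]
  | cons c cs ih =>
    by_cases hs : (c == '-' || c == ' ' || c == '_') = true
    · simp [pvAOut, pvSplit, hs, ih.1, pvPick]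
    · constructor
      · simp [pvAOut, pvSplit, hs, pvPick, ih.2]
      · by_cases hu : (c == PySem.Chars.upperChar c) = true
        · simp [pvAOut, pvSplit, hs, hu, ih.2]
        · simp [pvAOut, pvSplit, hs, hu, ih.2]

-- ===== VERDICT (by name: the statement is the Claim_ definition above) =====
theorem project_name_to_id_spec : Claim_equal_project_name_to_id := by
  intro name _
  show project_name_to_id name = project_name_to_id_alt name
  unfold project_name_to_id project_name_to_id_alt
  have hB : name.toList.foldl
      (fun (groups : List (List Char)) t =>
        if t == '-' || t == ' ' || t == '_' then groups ++ [[]]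
        else groups.dropLast ++ [groups.getLastD [] ++ [t]])
      [[]] = pvSplit name.toList := by
    have := pvFoldB name.toList [] []
    simp only [List.nil_append] at this
    rw [this]
    obtain ⟨h, r, hr⟩ : ∃ h r, pvSplit name.toList = h :: r := by
      cases hsp : pvSplit name.toList with
      | nil => exact absurd hsp (pvSplit_ne_nil name.toList)
      | cons h r => exact ⟨h, r, rfl⟩
    simp [hr, pvMapHead]
  simp only [pvFoldA, List.nil_append, (pvMain name.toList).1, hB]
  cases h : (pvSplit name.toList).flatMap pvPick with
  | nil =>
    have : String.ofList ([] : List Char) = "" := rfl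
    simp [this]
  | cons x xs =>
    have hne : ¬ String.ofList (x :: xs) = "" := by
      intro hc
      have := congrArg String.toList hc
      rw [String.toList_ofList] at this
      simp at this
    simp [hne]
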